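-- pv_equiv track=rewrite | github.com/Agv01/Sintaxis | Parser.py | automataFinFunc
-- ===== SOURCE A (Python) =====
-- ESTADO_FINAL = "ESTADO FINAL"
--
-- ESTADO_NO_FINAL = "NO ACEPTADO"
--
-- ESTADO_TRAMPA = "EN ESTADO TRAMPA"
--
-- def automataFinFunc(lexema):
--     estado = 0
--     estadoFinal = [7]
--     for caracter in lexema:
--         if estado == 0 and caracter == "f":
--             estado = 1
--         elif estado == 1 and caracter == "i":
--             estado = 2
--         elif estado == 2 and caracter == "n":
--             estado = 3
--         elif estado == 3 and caracter == "f":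
--             estado = 4
--         elif estado == 4 and caracter == "u":
--             estado = 5
--         elif estado == 5 and caracter == "n":
--             estado = 6
--         elif estado == 6 and caracter == "c":
--             estado = 7
--         else:
--             estado = -1
--             break
--     if estado == -1:
--         return ESTADO_TRAMPA
--     elif estado in estadoFinal:
--         return ESTADO_FINAL
--     else:
--         return ESTADO_NO_FINAL
-- ===== SOURCE B (Python) =====
-- ESTADO_FINAL = "ESTADO FINAL"
--
-- ESTADO_NO_FINAL = "NO ACEPTADO"
--
-- ESTADO_TRAMPA = "EN ESTADO TRAMPA"
--
-- def automataFinFunc(lexema):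
--     target = "finfunc"
--     if lexema == target:
--         return ESTADO_FINAL
--     if len(lexema) < len(target) and target.startswith(lexema):
--         return ESTADO_NO_FINAL
--     return ESTADO_TRAMPA
-- ===== Notes on version B (the rewrite author's own statement) =====
-- stated objective: simpler
-- what changed: Replaced the seven-state per-character DFA loop with a direct equality / strict-prefix classification against the literal target keyword (no state variable, no loop).
import Mathlib
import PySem

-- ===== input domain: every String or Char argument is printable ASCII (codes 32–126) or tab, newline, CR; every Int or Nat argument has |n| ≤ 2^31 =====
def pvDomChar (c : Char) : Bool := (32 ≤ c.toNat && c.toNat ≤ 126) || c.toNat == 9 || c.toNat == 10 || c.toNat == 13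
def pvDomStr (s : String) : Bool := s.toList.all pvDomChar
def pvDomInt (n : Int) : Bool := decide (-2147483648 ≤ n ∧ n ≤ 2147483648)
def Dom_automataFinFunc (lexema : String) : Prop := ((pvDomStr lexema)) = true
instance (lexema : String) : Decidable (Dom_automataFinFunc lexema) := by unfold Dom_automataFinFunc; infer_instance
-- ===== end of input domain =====

-- B replaces A's seven-state per-character DFA loop by a direct equality / strict-prefix
-- classification against the literal "finfunc" (objective: simpler).


-- ===== PORT A =====
-- the for-loop with its in-place 'break': estado = -1 stops the iteration
def pvLoopA : Int → List Char → Int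
  | estado, [] => estado
  | estado, c :: rest =>
    if estado = 0 ∧ c = 'f' then pvLoopA 1 rest
    else if estado = 1 ∧ c = 'i' then pvLoopA 2 rest
    else if estado = 2 ∧ c = 'n' then pvLoopA 3 rest
    else if estado = 3 ∧ c = 'f' then pvLoopA 4 rest
    else if estado = 4 ∧ c = 'u' then pvLoopA 5 rest
    else if estado = 5 ∧ c = 'n' then pvLoopA 6 rest
    else if estado = 6 ∧ c = 'c' then pvLoopA 7 rest
    else (-1)

def automataFinFunc (lexema : String) : String :=
  let estadoFinal : List Int := [7]
  let estado := pvLoopA 0 lexema.toList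
  if estado = -1 then "EN ESTADO TRAMPA"
  else if estadoFinal.contains estado then "ESTADO FINAL"
  else "NO ACEPTADO"

-- ===== PORT B =====
def automataFinFunc_alt (lexema : String) : String :=
  let target := "finfunc"
  if lexema = target then "ESTADO FINAL"
  else if PySem.Str.len lexema < PySem.Str.len target ∧ PySem.Str.startswith target lexema = true then
    "NO ACEPTADO"
  else "EN ESTADO TRAMPA"

-- ===== PRECONDITION & SPEC =====
def Spec_automataFinFunc (lexema : String) (out : String) : Prop := out = automataFinFunc_alt lexema
instance (lexema : String) (out : String) : Decidable (Spec_automataFinFunc lexema out) := by unfold Spec_automataFinFunc; infer_instance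

-- ===== CLAIM (what is proved, stated in full; the proofs are below) =====
def Claim_equal_automataFinFunc : Prop := ∀ (lexema : String), Dom_automataFinFunc lexema → Spec_automataFinFunc lexema (automataFinFunc lexema)

-- ===== LEMMAS AND PROOFS =====

-- proof-side abbreviation for "finfunc".toList
def pvTgt : List Char := ['f', 'i', 'n', 'f', 'u', 'n', 'c']

-- A's loop from state k consumes cs against the rest of the target: it ends in state
-- k + |cs| when cs is a prefix of what remains of "finfunc", and in -1 otherwise.
lemma pvLoopA_spec (cs : List Char) : ∀ k : Nat, k ≤ 7 →
    pvLoopA (k : Int) cs =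
      if cs <+: (List.drop k pvTgt) then ((k : Int) + cs.length) else -1 := by
  induction cs with
  | nil => intro k hk; simp [pvLoopA]
  | cons c cs ih =>
    intro k hk
    interval_cases k
    · push_cast
      -- state 0, expects 'f'
      by_cases hc : c = 'f'
      · subst hc
        rw [show pvLoopA (0 : Int) ('f' :: cs) = pvLoopA 1 cs from by norm_num [pvLoopA]]
        rw [show (1 : Int) = ((1 : Nat) : Int) from by norm_num]
        rw [ih 1 (by norm_num)]
        have hd : List.drop 0 pvTgt = 'f' :: List.drop 1 pvTgt := by decide
        simp only [hd, List.cons_prefix_cons, eq_self_iff_true, true_and]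
        split_ifs <;> push_cast [List.length_cons] <;> omega
      · rw [show pvLoopA (0 : Int) (c :: cs) = -1 from by norm_num [pvLoopA, hc]]
        have hd : List.drop 0 pvTgt = 'f' :: List.drop 1 pvTgt := by decide
        simp only [hd, List.cons_prefix_cons, eq_self_iff_true, true_and]
        simp [hc]
    · push_cast
      -- state 1, expects 'i'
      by_cases hc : c = 'i'
      · subst hc
        rw [show pvLoopA (1 : Int) ('i' :: cs) = pvLoopA 2 cs from by norm_num [pvLoopA]]
        rw [show (2 : Int) = ((2 : Nat) : Int) from by norm_num]
        rw [ih 2 (by norm_num)]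
        have hd : List.drop 1 pvTgt = 'i' :: List.drop 2 pvTgt := by decide
        simp only [hd, List.cons_prefix_cons, eq_self_iff_true, true_and]
        split_ifs <;> push_cast [List.length_cons] <;> omega
      · rw [show pvLoopA (1 : Int) (c :: cs) = -1 from by norm_num [pvLoopA, hc]]
        have hd : List.drop 1 pvTgt = 'i' :: List.drop 2 pvTgt := by decide
        simp only [hd, List.cons_prefix_cons, eq_self_iff_true, true_and]
        simp [hc]
    · push_cast
      -- state 2, expects 'n'
      by_cases hc : c = 'n'
      · subst hc
        rw [show pvLoopA (2 : Int) ('n' :: cs) = pvLoopA 3 cs from by norm_num [pvLoopA]]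
        rw [show (3 : Int) = ((3 : Nat) : Int) from by norm_num]
        rw [ih 3 (by norm_num)]
        have hd : List.drop 2 pvTgt = 'n' :: List.drop 3 pvTgt := by decide
        simp only [hd, List.cons_prefix_cons, eq_self_iff_true, true_and]
        split_ifs <;> push_cast [List.length_cons] <;> omega
      · rw [show pvLoopA (2 : Int) (c :: cs) = -1 from by norm_num [pvLoopA, hc]]
        have hd : List.drop 2 pvTgt = 'n' :: List.drop 3 pvTgt := by decide
        simp only [hd, List.cons_prefix_cons, eq_self_iff_true, true_and]
        simp [hc]
    · push_cast
      -- state 3, expects 'f'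
      by_cases hc : c = 'f'
      · subst hc
        rw [show pvLoopA (3 : Int) ('f' :: cs) = pvLoopA 4 cs from by norm_num [pvLoopA]]
        rw [show (4 : Int) = ((4 : Nat) : Int) from by norm_num]
        rw [ih 4 (by norm_num)]
        have hd : List.drop 3 pvTgt = 'f' :: List.drop 4 pvTgt := by decide
        simp only [hd, List.cons_prefix_cons, eq_self_iff_true, true_and]
        split_ifs <;> push_cast [List.length_cons] <;> omega
      · rw [show pvLoopA (3 : Int) (c :: cs) = -1 from by norm_num [pvLoopA, hc]]
        have hd : List.drop 3 pvTgt = 'f' :: List.drop 4 pvTgt := by decide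
        simp only [hd, List.cons_prefix_cons, eq_self_iff_true, true_and]
        simp [hc]
    · push_cast
      -- state 4, expects 'u'
      by_cases hc : c = 'u'
      · subst hc
        rw [show pvLoopA (4 : Int) ('u' :: cs) = pvLoopA 5 cs from by norm_num [pvLoopA]]
        rw [show (5 : Int) = ((5 : Nat) : Int) from by norm_num]
        rw [ih 5 (by norm_num)]
        have hd : List.drop 4 pvTgt = 'u' :: List.drop 5 pvTgt := by decide
        simp only [hd, List.cons_prefix_cons, eq_self_iff_true, true_and]
        split_ifs <;> push_cast [List.length_cons] <;> omega
      · rw [show pvLoopA (4 : Int) (c :: cs) = -1 from by norm_num [pvLoopA, hc]]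
        have hd : List.drop 4 pvTgt = 'u' :: List.drop 5 pvTgt := by decide
        simp only [hd, List.cons_prefix_cons, eq_self_iff_true, true_and]
        simp [hc]
    · push_cast
      -- state 5, expects 'n'
      by_cases hc : c = 'n'
      · subst hc
        rw [show pvLoopA (5 : Int) ('n' :: cs) = pvLoopA 6 cs from by norm_num [pvLoopA]]
        rw [show (6 : Int) = ((6 : Nat) : Int) from by norm_num]
        rw [ih 6 (by norm_num)]
        have hd : List.drop 5 pvTgt = 'n' :: List.drop 6 pvTgt := by decide
        simp only [hd, List.cons_prefix_cons, eq_self_iff_true, true_and]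
        split_ifs <;> push_cast [List.length_cons] <;> omega
      · rw [show pvLoopA (5 : Int) (c :: cs) = -1 from by norm_num [pvLoopA, hc]]
        have hd : List.drop 5 pvTgt = 'n' :: List.drop 6 pvTgt := by decide
        simp only [hd, List.cons_prefix_cons, eq_self_iff_true, true_and]
        simp [hc]
    · push_cast
      -- state 6, expects 'c'
      by_cases hc : c = 'c'
      · subst hc
        rw [show pvLoopA (6 : Int) ('c' :: cs) = pvLoopA 7 cs from by norm_num [pvLoopA]]
        rw [show (7 : Int) = ((7 : Nat) : Int) from by norm_num]
        rw [ih 7 (by norm_num)]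
        have hd : List.drop 6 pvTgt = 'c' :: List.drop 7 pvTgt := by decide
        simp only [hd, List.cons_prefix_cons, eq_self_iff_true, true_and]
        split_ifs <;> push_cast [List.length_cons] <;> omega
      · rw [show pvLoopA (6 : Int) (c :: cs) = -1 from by norm_num [pvLoopA, hc]]
        have hd : List.drop 6 pvTgt = 'c' :: List.drop 7 pvTgt := by decide
        simp only [hd, List.cons_prefix_cons, eq_self_iff_true, true_and]
        simp [hc]
    · push_cast
      -- state 7: no outgoing transition
      rw [show pvLoopA (7 : Int) (c :: cs) = -1 from by norm_num [pvLoopA]]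
      have hd : List.drop 7 pvTgt = ([] : List Char) := by decide
      rw [hd]
      simp

-- ===== VERDICT =====
theorem automataFinFunc_spec : Claim_equal_automataFinFunc := by
  intro lexema _
  unfold Spec_automataFinFunc automataFinFunc automataFinFunc_alt
  have h := pvLoopA_spec lexema.toList 0 (by norm_num)
  simp only [Nat.cast_zero, List.drop_zero, zero_add] at h
  have htgt : ("finfunc" : String).toList = pvTgt := rfl
  by_cases heq : lexema = "finfunc"
  · subst heq; decide
  · have hne : lexema.toList ≠ pvTgt := fun hl => heq (String.toList_inj.mp (hl.trans htgt.symm))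
    by_cases hpre : lexema.toList <+: pvTgt
    · -- strict prefix: both sides give "NO ACEPTADO"
      have hlen : lexema.toList.length < 7 := by
        have h7 : lexema.toList.length ≤ 7 := by simpa [pvTgt] using hpre.length_le
        rcases lt_or_eq_of_le h7 with h' | h'
        · exact h'
        · exact absurd (List.IsPrefix.eq_of_length hpre (by simpa [pvTgt] using h')) hne
      have hsw : PySem.Str.startswith "finfunc" lexema = true := by
        rw [PySem.Str.startswith_eq]
        exact (PySem.Chars.startswith_iff _ _).mpr (htgt ▸ hpre)
      have hl1 : PySem.Str.len lexema = (lexema.toList.length : Int) := by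
        simp [PySem.Str.len]
      have hl2 : PySem.Str.len "finfunc" = (7 : Int) := by decide
      simp only [h, if_pos hpre]
      have c1 : ¬ ((lexema.toList.length : Int) = -1) := by omega
      have c2 : ([(7 : Int)].contains ((lexema.toList.length : Int))) = false := by
        simp only [List.contains_eq_mem, List.mem_singleton, decide_eq_false_iff_not]
        omega
      have hcond : PySem.Str.len lexema < PySem.Str.len "finfunc" ∧
          PySem.Str.startswith "finfunc" lexema = true :=
        ⟨by rw [hl1, hl2]; exact_mod_cast hlen, hsw⟩
      rw [if_neg c1, c2, if_neg heq, if_pos hcond]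
      simp
    · -- not a prefix: both sides give "EN ESTADO TRAMPA"
      simp only [h, if_neg hpre]
      rw [if_pos trivial, if_neg heq,
        if_neg (by
          rintro ⟨-, hsw⟩
          rw [PySem.Str.startswith_eq] at hsw
          exact hpre (htgt ▸ (PySem.Chars.startswith_iff _ _).mp hsw))]
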